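-- pv_equiv track=rewrite | github.com/UserDongHu/CodingTest | 프로그래머스/0/120884. 치킨 쿠폰/치킨 쿠폰.py | solution
-- ===== SOURCE A (Python) =====
-- def solution(chicken):
--     coupon = 0
--     answer = 0
--     while chicken:
--         chicken -= 1
--         coupon += 1
--         if coupon >= 10:
--             answer += 1
--             coupon -= 9
--     return answer
-- ===== SOURCE B (Python) =====
-- def solution(chicken):
--     # closed form: each free chicken costs 9 net coupons after the first 10
--     return (chicken - 1) // 9 if chicken >= 1 else 0
-- ===== Notes on version B (the rewrite author's own statement) =====
-- stated objective: faster
-- what changed: replaced the per-chicken while-loop simulation of coupon accumulation with a single closed-form floor division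
import Mathlib
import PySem

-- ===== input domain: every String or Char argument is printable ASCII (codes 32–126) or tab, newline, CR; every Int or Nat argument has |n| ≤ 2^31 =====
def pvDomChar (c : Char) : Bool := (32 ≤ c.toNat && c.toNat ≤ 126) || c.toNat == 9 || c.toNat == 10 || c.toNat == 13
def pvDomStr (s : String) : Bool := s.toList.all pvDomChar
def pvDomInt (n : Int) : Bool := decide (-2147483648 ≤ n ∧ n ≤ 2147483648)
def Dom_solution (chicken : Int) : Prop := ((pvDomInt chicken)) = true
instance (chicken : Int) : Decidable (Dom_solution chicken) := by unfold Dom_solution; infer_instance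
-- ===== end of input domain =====

-- B replaces A's per-chicken while-loop simulation with a single closed-form floor division (faster).
-- Pre_ excludes chicken < 0, on which A's `while chicken:` loop never terminates.


-- ===== PORT A =====
-- while chicken: chicken -= 1; coupon += 1; if coupon >= 10: answer += 1; coupon -= 9
-- the loop runs exactly chicken.toNat iterations when chicken ≥ 0 (it diverges for chicken < 0,
-- excluded by Pre_; the `if chicken < 0 then 0` guard only makes the port total there)
def solLoop : Nat → Int → Int → Int
  | 0, _, answer => answer
  | Nat.succ n, coupon, answer =>
      let c := coupon + 1
      if c ≥ 10 then solLoop n (c - 9) (answer + 1) else solLoop n c answer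

def solution (chicken : Int) : Int :=
  if chicken < 0 then 0 else solLoop chicken.toNat 0 0

-- ===== PORT B =====
def solution_alt (chicken : Int) : Int :=
  if 1 ≤ chicken then PySem.Int.floordiv (chicken - 1) 9 else 0

-- ===== PRECONDITION & SPEC =====
-- A's while-loop never terminates for chicken < 0
def Pre_solution (chicken : Int) : Prop := 0 ≤ chicken
instance (chicken : Int) : Decidable (Pre_solution chicken) := by unfold Pre_solution; infer_instance
def pvWitness_solution : Int := (23)

def Spec_solution (chicken : Int) (out : Int) : Prop := out = solution_alt chicken
instance (chicken : Int) (out : Int) : Decidable (Spec_solution chicken out) := by unfold Spec_solution; infer_instance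

-- ===== CLAIM (what is proved, stated in full; the proofs are below) =====
def Claim_equal_solution : Prop := ∀ (chicken : Int), Dom_solution chicken → Pre_solution chicken → Spec_solution chicken (solution chicken)

-- ===== LEMMAS AND PROOFS =====
theorem solLoop_closed (n : Nat) : ∀ (c : Nat) (a : Int), c ≤ 9 →
    solLoop n (c : Int) a = a + (if n + c = 0 then 0 else (((n + c - 1) / 9 : Nat) : Int)) := by
  induction n with
  | zero =>
    intro c a hc
    have h9 : (c - 1) / 9 = 0 := by omega
    simp [solLoop]
    omega
  | succ n ih =>
    intro c a hc
    by_cases h : c = 9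
    · subst h
      have step : solLoop (n + 1) ((9 : Nat) : Int) a = solLoop n ((1 : Nat) : Int) (a + 1) := by
        norm_num [solLoop]
      rw [step, ih 1 (a + 1) (by omega)]
      have : (n + 1 + 9 - 1) / 9 = n / 9 + 1 := by omega
      simp [this]
      omega
    · have hlt : c < 9 := by omega
      have step : solLoop (n + 1) (c : Int) a = solLoop n ((c + 1 : Nat) : Int) a := by
        have hne : ¬ ((c : Int) + 1 ≥ 10) := by push_cast; omega
        simp [solLoop, hne]
      rw [step, ih (c + 1) a (by omega)]
      have h1 : ¬ (n + 1 + c = 0) := by omega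
      have h2 : ¬ (n + (c + 1) = 0) := by omega
      have h3 : n + (c + 1) - 1 = n + 1 + c - 1 := by omega
      simp [h3]

theorem solution_eq_alt (chicken : Int) (h : 0 ≤ chicken) :
    solution chicken = solution_alt chicken := by
  obtain ⟨n, rfl⟩ := Int.eq_ofNat_of_zero_le h
  have hloop := solLoop_closed n 0 0 (by omega)
  simp only [Nat.add_zero] at hloop
  unfold solution solution_alt
  have ht : ((n : Int)).toNat = n := Int.toNat_natCast n
  rw [if_neg (by omega), ht]
  simp only [Int.natCast_zero] at hloop
  rw [hloop]
  by_cases hn : n = 0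
  · subst hn; norm_num
  · have h1 : (1 : Int) ≤ (n : Int) := by omega
    have hcast : ((n : Int) - 1) = ((n - 1 : Nat) : Int) := by omega
    rw [if_neg hn, if_pos h1, hcast,
      show (9 : Int) = ((9 : Nat) : Int) from rfl, PySem.Int.floordiv_natCast]
    simp

-- ===== VERDICT (by name: the statement is the Claim_ definition above) =====
theorem solution_spec : Claim_equal_solution := by
  intro chicken _ hpre
  exact solution_eq_alt chicken hpre
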